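-- pv_equiv track=rewrite | github.com/tatiana-kim/contest-algorithms | contest5/task2.py | countprefixsum
-- ===== SOURCE A (Python) =====
-- def countprefixsum(nums):
--     prefixsumbyvalue = {0: 1}
--     nowsum = 0
--     for now in nums:
--         nowsum += now
--         if nowsum not in prefixsumbyvalue:
--             prefixsumbyvalue[nowsum] = 1
--         prefixsumbyvalue[nowsum] += 1
--     return prefixsumbyvalue
-- ===== SOURCE B (Python) =====
-- def countprefixsum(nums):
--     prefixes = []
--     total = 0
--     for x in nums:
--         total += x
--         prefixes.append(total)
--     counts = {0: 1}
--     for p in prefixes: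
--         counts[p] = counts.get(p, 1) + 1
--     return counts
-- ===== Notes on version B (the rewrite author's own statement) =====
-- stated objective: alternative
-- what changed: A's single fused loop that updates the running sum and the count dict together is replaced by two separate passes: first materialise the list of prefix sums, then tally it into a dict with get(p, 1) + 1, which also collapses A's conditional seed-then-increment into one unconditional update.
import Mathlib
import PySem

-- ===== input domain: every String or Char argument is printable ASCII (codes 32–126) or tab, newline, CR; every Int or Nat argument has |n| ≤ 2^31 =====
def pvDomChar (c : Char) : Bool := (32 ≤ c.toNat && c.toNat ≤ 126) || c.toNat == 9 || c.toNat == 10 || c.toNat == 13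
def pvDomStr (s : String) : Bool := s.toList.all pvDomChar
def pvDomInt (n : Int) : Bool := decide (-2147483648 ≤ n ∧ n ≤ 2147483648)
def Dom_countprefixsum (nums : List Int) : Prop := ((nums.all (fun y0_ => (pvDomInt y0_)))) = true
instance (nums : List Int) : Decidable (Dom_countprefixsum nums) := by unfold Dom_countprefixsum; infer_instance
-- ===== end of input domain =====

-- B replaces A's single fused sum-and-count loop by two passes (build the list of prefix
-- sums, then tally it with dict.get); same cost, different decomposition (objective: alternative).

-- ===== PORT A =====
-- literal transliteration of A: one loop carrying (dict, nowsum)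
def countprefixsum (nums : List Int) : List (Int × Int) :=
  (nums.foldl
    (fun (st : PySem.Dict Int Int × Int) (now : Int) =>
      let nowsum := st.2 + now
      let d := st.1
      let d := if d.contains nowsum = false then d.insert nowsum 1 else d
      (d.insert nowsum (d.getD nowsum 0 + 1), nowsum))
    (PySem.Dict.ofList [((0 : Int), (1 : Int))], 0)).1.items

-- ===== PORT B =====
-- literal transliteration of B: pass 1 builds the prefix-sum list, pass 2 tallies it
def countprefixsum_alt (nums : List Int) : List (Int × Int) :=
  let prefixes :=
    (nums.foldl (fun (st : List Int × Int) (x : Int) => (st.1 ++ [st.2 + x], st.2 + x)) ([], 0)).1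
  (prefixes.foldl
    (fun (d : PySem.Dict Int Int) (p : Int) => d.insert p (d.getD p 1 + 1))
    (PySem.Dict.ofList [((0 : Int), (1 : Int))])).items

-- ===== PRECONDITION & SPEC =====
def Spec_countprefixsum (nums : List Int) (out : List (Int × Int)) : Prop := out = countprefixsum_alt nums
instance (nums : List Int) (out : List (Int × Int)) : Decidable (Spec_countprefixsum nums out) := by unfold Spec_countprefixsum; infer_instance

-- ===== CLAIM (what is proved, stated in full; the proofs are below) =====
def Claim_equal_countprefixsum : Prop := ∀ (nums : List Int), Dom_countprefixsum nums → Spec_countprefixsum nums (countprefixsum nums)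

-- ===== LEMMAS AND PROOFS =====

theorem pv_map_id {α : Type} (f : α → α) : ∀ (l : List α), (∀ p ∈ l, f p = p) → l.map f = l
  | [], _ => rfl
  | a :: t, h => by simp [h a (by simp), pv_map_id f t (fun p hp => h p (by simp [hp]))]

-- inserting twice at the same fresh key keeps only the second value
theorem pv_ins_ins {κ ν : Type} [BEq κ] [LawfulBEq κ] (d : PySem.Dict κ ν) (k : κ) (v w : ν)
    (h : d.contains k = false) : (d.insert k v).insert k w = d.insert k w := by
  apply PySem.Dict.ext
  rw [PySem.Dict.items_insert_of_contains _ _ (PySem.Dict.contains_insert_self d k v),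
      PySem.Dict.items_insert_of_not_contains _ _ h,
      PySem.Dict.items_insert_of_not_contains _ _ h, List.map_append]
  have hne : ∀ p ∈ d.items, (fun p => if p.1 == k then (k, w) else p) p = p := by
    intro p hp
    have : (p.1 == k) = false := by
      by_contra hc
      have hc' : (p.1 == k) = true := by simpa using hc
      have : d.contains k = true := by
        rcases d with ⟨l⟩
        simp only [PySem.Dict.contains, List.any_eq_true]
        exact ⟨p, hp, hc'⟩
      simp [this] at h
    simp [this]
  simp [pv_map_id _ d.items hne]

-- A's conditional seed-then-increment equals B's single get-with-default-1 insert
theorem pv_step (d : PySem.Dict Int Int) (n : Int) :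
    (let d' := if d.contains n = false then d.insert n 1 else d;
     d'.insert n (d'.getD n 0 + 1)) = d.insert n (d.getD n 1 + 1) := by
  by_cases h : d.contains n = false
  · simp only [h, if_true]
    rw [PySem.Dict.getD_insert_self, PySem.Dict.getD_of_not_contains _ _ h]
    exact pv_ins_ins d n 1 (1 + 1) h
  · have hc : d.contains n = true := by revert h; cases d.contains n <;> simp
    have hs : (d.get? n).isSome = true := by rw [← PySem.Dict.contains_eq_isSome_get?]; exact hc
    rcases Option.isSome_iff_exists.mp hs with ⟨v, hv⟩
    simp [hc, PySem.Dict.getD_of_get?_eq_some _ _ hv]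

-- the prefix-sum stream starting at s
def pvPf (s : Int) : List Int → List Int
  | [] => []
  | x :: t => (s + x) :: pvPf (s + x) t

theorem pv_prefixes (nums : List Int) : ∀ (acc : List Int) (s : Int),
    (nums.foldl (fun (st : List Int × Int) (x : Int) => (st.1 ++ [st.2 + x], st.2 + x)) (acc, s)).1
      = acc ++ pvPf s nums := by
  induction nums with
  | nil => intro acc s; simp [pvPf]
  | cons x t ih =>
    intro acc s
    simp only [List.foldl_cons, pvPf]
    rw [ih (acc ++ [s + x]) (s + x)]
    simp

theorem pv_main (nums : List Int) : ∀ (d : PySem.Dict Int Int) (s : Int),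
    (nums.foldl
      (fun (st : PySem.Dict Int Int × Int) (now : Int) =>
        let nowsum := st.2 + now
        let d := st.1
        let d := if d.contains nowsum = false then d.insert nowsum 1 else d
        (d.insert nowsum (d.getD nowsum 0 + 1), nowsum))
      (d, s)).1
    = (pvPf s nums).foldl
        (fun (d : PySem.Dict Int Int) (p : Int) => d.insert p (d.getD p 1 + 1)) d := by
  induction nums with
  | nil => intro d s; simp [pvPf]
  | cons x t ih =>
    intro d s
    simp only [List.foldl_cons, pvPf]
    rw [← ih]
    congr 1
    simp only []
    rw [pv_step d (s + x)]

-- ===== VERDICT (by name: the statement is the Claim_ definition above) =====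
theorem countprefixsum_spec : Claim_equal_countprefixsum := by
  intro nums _
  unfold Spec_countprefixsum countprefixsum countprefixsum_alt
  rw [pv_main, pv_prefixes]
  simp
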